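-- pv_equiv track=rewrite | github.com/yandex/yatool | devtools/ya/handlers/dump/reproducer/data/execute_ya.py | filter_ymake_args
-- ===== SOURCE A (Python) =====
-- YMAKE_ARGS_TO_EXCLUDE = {"--write-meta-data"}
--
-- def filter_ymake_args(args: list[str], include_args: list[str], exclude_args: list[str]) -> list[str]:
--     args_to_exclude = YMAKE_ARGS_TO_EXCLUDE | set(exclude_args)
--     args_to_exclude = args_to_exclude - set(include_args)
--
--     result = []
--     i = 0
--     args_length = len(args)
--
--     while i < args_length:
--         current_arg = args[i]
--         if current_arg in args_to_exclude:
--             if i + 1 < args_length and not args[i+1].startswith('-'):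
--                 i += 2  # Skiping flag and its value
--             else:
--                 i += 1  # Skipping flag only
--         else:
--             result.append(current_arg)
--             i += 1
--
--     return result
-- ===== SOURCE B (Python) =====
-- YMAKE_ARGS_TO_EXCLUDE = {"--write-meta-data"}
--
--
-- def filter_ymake_args(args: list[str], include_args: list[str], exclude_args: list[str]) -> list[str]:
--     # Find-and-splice: copy the whole run up to the next excluded flag in one
--     # extend, then cut the flag (and its non-dash value) off and repeat.
--     excl = (YMAKE_ARGS_TO_EXCLUDE | set(exclude_args)) - set(include_args)
--     result = []
--     rest = args
--     while rest:
--         j = next((k for k, a in enumerate(rest) if a in excl), None)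
--         if j is None:
--             result.extend(rest)
--             break
--         result.extend(rest[:j])
--         tail = rest[j + 1:]
--         if tail and not tail[0].startswith('-'):
--             rest = tail[1:]
--         else:
--             rest = tail
--     return result
-- ===== Notes on version B (the rewrite author's own statement) =====
-- stated objective: alternative
-- what changed: Replaced A's per-element index walk (while loop testing every position one by one) by a find-and-splice scan: repeatedly locate the next excluded flag, copy the whole clean run before it with one bulk extend, then cut off the flag and its non-dash value and continue on the remainder.
import Mathlib
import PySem

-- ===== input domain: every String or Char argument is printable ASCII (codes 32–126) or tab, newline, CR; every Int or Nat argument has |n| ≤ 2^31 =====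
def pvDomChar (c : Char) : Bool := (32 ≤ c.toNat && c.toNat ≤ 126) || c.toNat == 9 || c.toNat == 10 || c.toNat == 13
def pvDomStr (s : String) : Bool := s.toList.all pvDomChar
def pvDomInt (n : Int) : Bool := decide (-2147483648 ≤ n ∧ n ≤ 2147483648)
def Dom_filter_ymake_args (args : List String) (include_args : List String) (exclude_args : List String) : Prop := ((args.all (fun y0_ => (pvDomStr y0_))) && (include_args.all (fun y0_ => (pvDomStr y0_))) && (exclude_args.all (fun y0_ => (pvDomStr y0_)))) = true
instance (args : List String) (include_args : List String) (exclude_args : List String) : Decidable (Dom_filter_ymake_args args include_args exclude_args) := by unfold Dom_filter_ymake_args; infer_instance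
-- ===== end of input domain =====

-- B replaces A's per-element index loop by a find-and-splice scan that copies each
-- run up to the next excluded flag in one bulk extend (objective: alternative).

-- ===== PORT A =====
-- set arithmetic of A: (YMAKE_ARGS_TO_EXCLUDE | set(exclude_args)) then - set(include_args)
def pvExclA (include_args : List String) (exclude_args : List String) : PySem.Set String :=
  let args_to_exclude := PySem.Set.union (PySem.Set.ofList ["--write-meta-data"]) exclude_args
  let args_to_exclude := PySem.Set.diff args_to_exclude include_args
  args_to_exclude

-- the while loop of A, indexed by i
def pvLoopA (args : List String) (excl : PySem.Set String) (i : Nat) : List String :=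
  if _h : i < args.length then
    let current_arg := args.getD i ""
    if PySem.Set.contains excl current_arg then
      if i + 1 < args.length && !(PySem.Str.startswith (args.getD (i+1) "") "-") then
        pvLoopA args excl (i+2)
      else
        pvLoopA args excl (i+1)
    else
      current_arg :: pvLoopA args excl (i+1)
  else []
termination_by args.length - i

def filter_ymake_args (args : List String) (include_args : List String) (exclude_args : List String) : List String :=
  pvLoopA args (pvExclA include_args exclude_args) 0

-- ===== PORT B =====
def pvExclB (include_args : List String) (exclude_args : List String) : PySem.Set String :=
  PySem.Set.diff (PySem.Set.union (PySem.Set.ofList ["--write-meta-data"]) exclude_args) include_args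

-- Source B's while loop: split `rest` at the first excluded flag ("j = next(...)";
-- rest[:j] / rest[j:] are exactly takeWhile/dropWhile of "not in excl"),
-- copy the prefix wholesale, cut the flag (and its non-dash value), repeat.
def pvLoopB (excl : PySem.Set String) (rest : List String) : List String :=
  let pre := rest.takeWhile (fun a => !(PySem.Set.contains excl a))   -- rest[:j]
  let suf := rest.dropWhile (fun a => !(PySem.Set.contains excl a))   -- rest[j:]
  if h1 : suf = [] then pre                        -- j is None: extend with all of rest
  else
    let tail := suf.tail                           -- rest[j+1:]
    if h2 : tail = [] then pre                     -- flag was last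
    else if !(PySem.Str.startswith (tail.headD "") "-") then pre ++ pvLoopB excl tail.tail
    else pre ++ pvLoopB excl tail
termination_by rest.length
decreasing_by
  all_goals
    have hle := (List.dropWhile_sublist (l := rest)
      (p := fun a => !(PySem.Set.contains excl a))).length_le
    have l1 : 0 < (rest.dropWhile (fun a => !(PySem.Set.contains excl a))).length :=
      List.length_pos_iff.mpr h1
    have l2 : 0 < (rest.dropWhile (fun a => !(PySem.Set.contains excl a))).tail.length :=
      List.length_pos_iff.mpr h2
    simp only [List.length_tail] at *
    omega

def filter_ymake_args_alt (args : List String) (include_args : List String) (exclude_args : List String) : List String :=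
  pvLoopB (pvExclB include_args exclude_args) args

-- ===== PRECONDITION & SPEC =====
def Spec_filter_ymake_args (args : List String) (include_args : List String) (exclude_args : List String) (out : List String) : Prop := out = filter_ymake_args_alt args include_args exclude_args
instance (args : List String) (include_args : List String) (exclude_args : List String) (out : List String) : Decidable (Spec_filter_ymake_args args include_args exclude_args out) := by unfold Spec_filter_ymake_args; infer_instance

-- ===== CLAIM (what is proved, stated in full; the proofs are below) =====
def Claim_equal_filter_ymake_args : Prop := ∀ (args : List String) (include_args : List String) (exclude_args : List String), Dom_filter_ymake_args args include_args exclude_args → Spec_filter_ymake_args args include_args exclude_args (filter_ymake_args args include_args exclude_args)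

-- ===== LEMMAS AND PROOFS =====
-- proof-side intermediate: A's loop rephrased as structural recursion on the suffix
def pvGoA (excl : PySem.Set String) : List String → List String
  | [] => []
  | [a] => if PySem.Set.contains excl a then [] else [a]
  | a :: b :: rest =>
    if PySem.Set.contains excl a then
      if !(PySem.Str.startswith b "-") then pvGoA excl rest
      else pvGoA excl (b :: rest)
    else
      a :: pvGoA excl (b :: rest)

lemma pvGoA_cons_of_not (excl : PySem.Set String) (a : String) (rest : List String)
    (h : a ∉ excl) :
    pvGoA excl (a :: rest) = a :: pvGoA excl rest := by
  cases rest <;> simp [pvGoA, h]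

-- A's indexed loop computes pvGoA on the i-th suffix
lemma pvLoopA_eq_go (args : List String) (excl : PySem.Set String) :
    ∀ n i, args.length - i = n → pvLoopA args excl i = pvGoA excl (args.drop i) := by
  intro n
  induction n using Nat.strong_induction_on with
  | _ n ih =>
    intro i hn
    by_cases hi : i < args.length
    · have hdrop : args.drop i = args[i] :: args.drop (i+1) := List.drop_eq_getElem_cons hi
      have hget : args.getD i "" = args[i] := by
        simp [List.getD_eq_getElem?_getD, List.getElem?_eq_getElem hi]
      rw [pvLoopA]
      simp only [hi, dif_pos, hget]
      by_cases hc : PySem.Set.contains excl args[i] = true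
      · simp only [hc, if_pos]
        by_cases h1 : i + 1 < args.length
        · have hdrop1 : args.drop (i+1) = args[i+1] :: args.drop (i+2) := List.drop_eq_getElem_cons h1
          have hget1 : args.getD (i+1) "" = args[i+1] := by
            simp [List.getD_eq_getElem?_getD, List.getElem?_eq_getElem h1]
          rw [hdrop, hdrop1, pvGoA]
          simp only [hc, if_pos, hget1]
          by_cases hsw : PySem.Str.startswith args[i+1] "-" = true
          · have hsw' : PySem.Chars.startswith args[i+1].toList ['-'] = true := by simpa using hsw
            rw [if_neg (by simp [h1, hsw']), ih (args.length - (i+1)) (by omega) (i+1) rfl, hdrop1]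
            simp [hsw']
          · have hsw' : PySem.Chars.startswith args[i+1].toList ['-'] = false := by
              simpa using hsw
            rw [if_pos (by simp [h1, hsw']),
                ih (args.length - (i+2)) (by omega) (i+2) rfl]
            simp [hsw']
        · have hm : args[i] ∈ excl := by simpa using hc
          rw [if_neg (by simp [h1]), hdrop, List.drop_eq_nil_of_le (by omega : args.length ≤ i+1)]
          rw [pvLoopA]
          simp [pvGoA, hm, show ¬ (i+1 < args.length) from h1]
      · have hc' : args[i] ∉ excl := by simpa using hc
        rw [if_neg hc, hdrop, ih (args.length - (i+1)) (by omega) (i+1) rfl,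
            pvGoA_cons_of_not excl args[i] _ hc']
    · rw [pvLoopA, dif_neg hi, List.drop_eq_nil_of_le (by omega : args.length ≤ i)]
      simp [pvGoA]

-- B's find-and-splice loop computes the same suffix recursion
lemma pvGo_eq_loopB (excl : PySem.Set String) :
    ∀ n (l : List String), l.length = n → pvGoA excl l = pvLoopB excl l := by
  intro n
  induction n using Nat.strong_induction_on with
  | _ n ih =>
    intro l hn
    match l with
    | [] => simp [pvGoA, pvLoopB]
    | a :: rest =>
      by_cases hc : PySem.Set.contains excl a = true
      · -- first element is already an excluded flag: pre = [], suf = a :: rest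
        rw [pvLoopB.eq_def]
        simp only [List.takeWhile_cons, List.dropWhile_cons, hc, Bool.not_true,
          Bool.false_eq_true, if_false, List.tail_cons]
        have hm : a ∈ excl := by simpa using hc
        match rest with
        | [] => simp [pvGoA, hm]
        | b :: rest' =>
          have hlen : (b :: rest').length < n := by simp at hn ⊢; omega
          have hlen' : rest'.length < n := by simp at hn; omega
          by_cases hsw : PySem.Chars.startswith b.toList ['-'] = true
          · have h := ih (b :: rest').length hlen (b :: rest') rfl
            simp [pvGoA, hm, hsw] at h ⊢
            exact h
          · have hsw' : PySem.Chars.startswith b.toList ['-'] = false := by simpa using hsw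
            have h := ih rest'.length hlen' rest' rfl
            simp [pvGoA, hm, hsw'] at h ⊢
            exact h
      · -- first element kept: both loops emit `a` in front and continue on rest
        have hc' : a ∉ excl := by simpa using hc
        have hcb : PySem.Set.contains excl a = false := by simpa using hc
        have hcons : pvLoopB excl (a :: rest) = a :: pvLoopB excl rest := by
          rw [pvLoopB.eq_def]
          conv_rhs => rw [pvLoopB.eq_def]
          simp only [List.takeWhile_cons, List.dropWhile_cons, hcb, Bool.not_false, if_true]
          by_cases h1 : (rest.dropWhile (fun a => !(PySem.Set.contains excl a))) = []
          · rw [dif_pos h1, dif_pos h1]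
          · rw [dif_neg h1, dif_neg h1]
            by_cases h2 : (rest.dropWhile (fun a => !(PySem.Set.contains excl a))).tail = []
            · rw [dif_pos h2, dif_pos h2]
            · rw [dif_neg h2, dif_neg h2]
              cases hx : PySem.Str.startswith
                  ((rest.dropWhile (fun a => !(PySem.Set.contains excl a))).tail.headD "") "-" <;>
                simp
        rw [hcons, pvGoA_cons_of_not excl a rest hc',
            ih rest.length (by simp at hn; omega) _ rfl]

-- ===== VERDICT (by name: the statement is the Claim_ definition above) =====
theorem filter_ymake_args_spec : Claim_equal_filter_ymake_args := by
  intro args include_args exclude_args _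
  unfold Spec_filter_ymake_args filter_ymake_args filter_ymake_args_alt
  rw [show pvExclA include_args exclude_args = pvExclB include_args exclude_args from rfl,
      pvLoopA_eq_go args _ (args.length - 0) 0 rfl, List.drop_zero,
      pvGo_eq_loopB _ args.length args rfl]
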